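-- pv_equiv track=rewrite | github.com/erijjj/base_de_donnee | TP2/TP2_Ex4_Erij.py | isBCNF
-- ===== SOURCE A (Python) =====
-- def closure(F: "list of dependencies", K: "set") -> set:
--     """
--     Retourne la fermeture de K sous F (K+).
--     On part de K et on applique les DF de F jusqu'à stabilité.
--     """
--     result = set(K)
--     changed = True
--     while changed:
--         changed = False
--         for alpha, beta in F:
--             if alpha.issubset(result):
--                 before = len(result)
--                 result = result.union(beta)
--                 if len(result) > before:
--                     changed = True
--     return result
--
-- def isSuperKey(F: "list of dependencies", R: set, K: set) -> bool:
--     """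
--     K est une super-cle si K+ = R.
--     """
--     return closure(F, K) == R
--
-- def isBCNF(F: "list of dependencies", R: set) -> bool:
--     """
--     R est en bcnf si pour toute DF alpha -> beta non triviale,
--     alpha est une super-cle de R.
--     """
--     for alpha, beta in F:
--         alpha = set(alpha)
--         beta = set(beta)
--
--         if not alpha.issubset(R) or not beta.issubset(R):
--             continue
--
--         if beta.issubset(alpha):
--             continue
--         if not isSuperKey(F, R, alpha):
--             return False
--     return True
-- ===== SOURCE B (Python) =====
-- def _closure_fast(F, K):
--     """K+ under F by a worklist: index FDs by left-hand attribute, re-examine an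
--     FD only when one of its lhs attributes enters the closure."""
--     watch = {}
--     for alpha, beta in F:
--         for x in alpha:
--             watch.setdefault(x, []).append((alpha, beta))
--     clo = set(K)
--     queue = list(K)
--     for alpha, beta in F:          # fire FDs already satisfied by K (incl. empty lhs)
--         if alpha <= clo:
--             for y in beta:
--                 if y not in clo:
--                     clo.add(y)
--                     queue.append(y)
--     while queue:
--         x = queue.pop()
--         for alpha, beta in watch.get(x, ()):
--             if alpha <= clo:
--                 for y in beta:
--                     if y not in clo:
--                         clo.add(y)
--                         queue.append(y)
--     return clo
--
-- def isBCNF(F, R):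
--     for alpha, beta in F:
--         if alpha <= R and beta <= R and not beta <= alpha:
--             if _closure_fast(F, alpha) != R:
--                 return False
--     return True
-- ===== Notes on version B (the rewrite author's own statement) =====
-- stated objective: alternative
-- what changed: The fixpoint closure that rescans every FD on every round until nothing changes is replaced by a worklist closure: FDs are indexed by left-hand attribute once, and an FD is re-examined only when one of its lhs attributes newly enters the closure.
import Mathlib
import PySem

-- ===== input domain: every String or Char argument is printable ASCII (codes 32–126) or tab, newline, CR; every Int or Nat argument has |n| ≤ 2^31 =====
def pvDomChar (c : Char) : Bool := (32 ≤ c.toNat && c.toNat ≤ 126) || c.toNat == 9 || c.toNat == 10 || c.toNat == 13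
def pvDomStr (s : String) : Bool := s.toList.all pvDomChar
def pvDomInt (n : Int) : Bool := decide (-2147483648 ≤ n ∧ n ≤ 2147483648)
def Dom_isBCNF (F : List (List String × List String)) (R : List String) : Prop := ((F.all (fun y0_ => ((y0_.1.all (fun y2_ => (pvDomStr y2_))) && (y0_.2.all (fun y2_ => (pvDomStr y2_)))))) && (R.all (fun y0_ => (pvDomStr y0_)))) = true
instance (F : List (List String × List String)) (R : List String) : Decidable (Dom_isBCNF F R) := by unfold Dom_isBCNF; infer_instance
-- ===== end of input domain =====

-- B replaces A's repeated full rescans of F inside `closure` by a watch-list worklist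
-- (index FDs by left-hand attribute; re-examine an FD only when one of its lhs
-- attributes newly enters the closure); objective: alternative closure algorithm, same result.

-- ===== PORT A =====
-- one pass of A's inner `for alpha, beta in F` loop; state = (changed, result)
def aStep (st : Bool × List String) (ab : List String × List String) : Bool × List String :=
  if PySem.Set.issubset ab.1 st.2 then
    let r := PySem.Set.union st.2 ab.2
    (if st.2.length < r.length then true else st.1, r)
  else st

def aRound (F : List (List String × List String)) (st : Bool × List String) : Bool × List String :=
  F.foldl aStep st

-- A's `while changed` loop.  The loop always terminates because `result` strictly
-- grows (by elements of the betas) on every continued round, so (sum of |beta|)+1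
-- rounds of fuel are provably enough (see `aLoop_closed` below); the fuel guard only
-- makes the same computation total.
def aLoop : Nat → List (List String × List String) → List String → List String
  | 0, _, result => result
  | fuel+1, F, result =>
    let st := aRound F (false, result)
    if st.1 then aLoop fuel F st.2 else st.2

def aFuel (F : List (List String × List String)) : Nat :=
  (F.map fun ab => ab.2.length).sum + 1

-- closure(F, K)
def aClosure (F : List (List String × List String)) (K : List String) : List String :=
  aLoop (aFuel F) F (PySem.Set.ofList K)

-- isSuperKey(F, R, K)
def aIsSuperKey (F : List (List String × List String)) (R K : List String) : Bool :=
  PySem.Set.equal (aClosure F K) R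

-- isBCNF's `for alpha, beta in F` loop with its `continue`/`return False` chain
def aMain (F0 : List (List String × List String)) :
    List (List String × List String) → List String → Bool
  | [], _ => true
  | ab :: rest, R =>
    let alpha := PySem.Set.ofList ab.1
    let beta := PySem.Set.ofList ab.2
    if !(PySem.Set.issubset alpha R) || !(PySem.Set.issubset beta R) then aMain F0 rest R
    else if PySem.Set.issubset beta alpha then aMain F0 rest R
    else if !(aIsSuperKey F0 R alpha) then false
    else aMain F0 rest R

def isBCNF (F : List (List String × List String)) (R : List String) : Bool :=
  aMain F F R

-- ===== PORT B =====
-- watch.setdefault(x, []).append((alpha, beta)) for every x in alpha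
def bWatchAdd (ab : List String × List String)
    (w : PySem.Dict String (List (List String × List String))) :
    PySem.Dict String (List (List String × List String)) :=
  ab.1.foldl (fun w x => w.modify x [] (fun l => l ++ [ab])) w

def bWatch (F : List (List String × List String)) :
    PySem.Dict String (List (List String × List String)) :=
  F.foldl (fun w ab => bWatchAdd ab w) PySem.Dict.empty

-- `if y not in clo: clo.add(y); queue.append(y)`; state = (clo, queue)
def bFireStep (cq : List String × List String) (y : String) : List String × List String :=
  if PySem.Set.contains cq.1 y then cq else (PySem.Set.add cq.1 y, cq.2 ++ [y])

def bFire (cq : List String × List String) (beta : List String) : List String × List String :=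
  beta.foldl bFireStep cq

-- `for alpha, beta in L: if alpha <= clo: fire beta` (used for the initial pass over F
-- and for each watch[x] list — the two loops have this identical body in Source B)
def bScanStep (cq : List String × List String) (ab : List String × List String) :
    List String × List String :=
  if PySem.Set.issubset ab.1 cq.1 then bFire cq ab.2 else cq

def bScan (L : List (List String × List String)) (cq : List String × List String) :
    List String × List String :=
  L.foldl bScanStep cq

-- `while queue: x = queue.pop(); …` — pop() takes the LAST element (getLast?/dropLast
-- is exact for that).  Every queue entry is a distinct member of clo ⊆ K ∪ betas, so
-- |K| + (sum of |beta|) + 1 pops of fuel are provably enough (see `bLoop_spec` below).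
def bLoop : Nat → PySem.Dict String (List (List String × List String)) →
    List String × List String → List String
  | 0, _, cq => cq.1
  | fuel+1, w, cq =>
    match cq.2.getLast? with
    | none => cq.1
    | some x => bLoop fuel w (bScan (w.getD x []) (cq.1, cq.2.dropLast))

def bFuel (F : List (List String × List String)) (K : List String) : Nat :=
  K.length + (F.map fun ab => ab.2.length).sum + 1

-- _closure_fast(F, K)
def bClosure (F : List (List String × List String)) (K : List String) : List String :=
  bLoop (bFuel F K) (bWatch F) (bScan F (PySem.Set.ofList K, K))

-- isBCNF's loop in Source B
def bMain (F0 : List (List String × List String)) :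
    List (List String × List String) → List String → Bool
  | [], _ => true
  | ab :: rest, R =>
    if PySem.Set.issubset ab.1 R && PySem.Set.issubset ab.2 R &&
        !(PySem.Set.issubset ab.2 ab.1) then
      if !(PySem.Set.equal (bClosure F0 ab.1) R) then false else bMain F0 rest R
    else bMain F0 rest R

def isBCNF_alt (F : List (List String × List String)) (R : List String) : Bool :=
  bMain F F R

-- ===== PRECONDITION & SPEC =====
def Spec_isBCNF (F : List (List String × List String)) (R : List String) (out : Bool) : Prop := out = isBCNF_alt F R
instance (F : List (List String × List String)) (R : List String) (out : Bool) : Decidable (Spec_isBCNF F R out) := by unfold Spec_isBCNF; infer_instance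

-- ===== CLAIM (what is proved, stated in full; the proofs are below) =====
def Claim_equal_isBCNF : Prop := ∀ (F : List (List String × List String)) (R : List String), Dom_isBCNF F R → Spec_isBCNF F R (isBCNF F R)

-- ===== LEMMAS AND PROOFS =====

-- x is derivable from K under the FDs F (the least F-closed superset of K)
inductive Deriv (F : List (List String × List String)) (K : List String) : String → Prop
  | base {x} : x ∈ K → Deriv F K x
  | step {a b x} : (a, b) ∈ F → (∀ y ∈ a, Deriv F K y) → x ∈ b → Deriv F K x

def Closed (F : List (List String × List String)) (S : List String) : Prop :=
  ∀ p ∈ F, (∀ z ∈ p.1, z ∈ S) → ∀ y ∈ p.2, y ∈ S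

-- number of beta-occurrences not yet in r (the loop measure)
def mAtt (F : List (List String × List String)) (r : List String) : Nat :=
  ((F.flatMap Prod.snd).filter (fun y => decide (y ∉ r))).length

theorem filter_mono_length {l : List String} {p q : String → Bool}
    (h : ∀ y ∈ l, p y = true → q y = true) :
    (l.filter p).length ≤ (l.filter q).length := by
  induction l with
  | nil => simp
  | cons a l ih =>
    have ha := h a (by simp)
    have ih' := ih (fun y hy hp => h y (by simp [hy]) hp)
    cases hp : p a <;> cases hq : q a <;>
      simp [hp, hq] at * <;> omega

theorem filter_strict_length {l : List String} {p q : String → Bool}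
    (h : ∀ y ∈ l, p y = true → q y = true) {y0 : String}
    (h0 : y0 ∈ l) (hp : p y0 = false) (hq : q y0 = true) :
    (l.filter p).length < (l.filter q).length := by
  induction l with
  | nil => cases h0
  | cons a l ih =>
    have ih0 := filter_mono_length (l := l) (fun y hy hp => h y (by simp [hy]) hp)
    rcases List.mem_cons.mp h0 with rfl | h0l
    · simp [hp, hq]; omega
    · have := ih (fun y hy hp => h y (by simp [hy]) hp) h0l
      cases hp' : p a <;> cases hq' : q a <;>
        simp [hp', hq'] at * <;> omega

theorem mAtt_le_sum (F : List (List String × List String)) (r : List String) :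
    mAtt F r ≤ (F.map fun ab => ab.2.length).sum := by
  unfold mAtt
  calc ((F.flatMap Prod.snd).filter _).length ≤ (F.flatMap Prod.snd).length :=
        List.length_filter_le _ _
    _ = _ := by rw [List.length_flatMap]

theorem mAtt_lt {F : List (List String × List String)} {r r' : List String}
    (hsub : ∀ y ∈ r, y ∈ r') {y0 : String}
    (h0 : y0 ∈ F.flatMap Prod.snd) (h0r : y0 ∉ r) (h0r' : y0 ∈ r') :
    mAtt F r' < mAtt F r := by
  unfold mAtt
  apply filter_strict_length (y0 := y0) _ h0 (by simp [h0r']) (by simp [h0r])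
  intro y hy hp
  simp only [decide_eq_true_eq] at hp ⊢
  exact fun hyr => hp (hsub y hyr)

theorem mAtt_drop {F : List (List String × List String)} {r ext : List String}
    (hnd : ext.Nodup) (hext : ∀ y ∈ ext, y ∈ F.flatMap Prod.snd ∧ y ∉ r) :
    mAtt F (r ++ ext) + ext.length ≤ mAtt F r := by
  induction ext generalizing r with
  | nil => simp
  | cons y ys ih =>
    have hy := hext y (by simp)
    have h1 : mAtt F (r ++ [y]) < mAtt F r :=
      mAtt_lt (fun z hz => by simp [hz]) hy.1 hy.2 (by simp)
    have hnd' : ys.Nodup := hnd.of_cons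
    have hyys : y ∉ ys := (List.nodup_cons.mp hnd).1
    have h2 := ih (r := r ++ [y]) hnd' (fun z hz => by
      refine ⟨(hext z (by simp [hz])).1, ?_⟩
      simp only [List.mem_append, List.mem_singleton]
      rintro (hzr | rfl)
      · exact (hext z (by simp [hz])).2 hzr
      · exact hyys hz)
    have : r ++ y :: ys = (r ++ [y]) ++ ys := by simp
    rw [this]
    simp only [List.length_cons]
    omega

-- ---- A-side round lemmas ----

theorem union_append (s t : List String) :
    ∃ ext, PySem.Set.union s t = s ++ ext ∧ (∀ y ∈ ext, y ∈ t ∧ y ∉ s) ∧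
      (s.Nodup → (s ++ ext).Nodup) := by
  refine ⟨(PySem.Set.ofList t).filter (fun y => !PySem.Set.contains s y), ?_, ?_, ?_⟩
  · show PySem.Set.update s t = _
    exact PySem.Set.update_eq_append_filter s t
  · intro y hy
    have := List.mem_filter.mp hy
    refine ⟨(PySem.Set.mem_ofList t y).mp this.1, ?_⟩
    have h2 := this.2
    simp only [Bool.not_eq_eq_eq_not, Bool.not_true] at h2
    intro hys
    rw [(PySem.Set.contains_iff s y).mpr hys] at h2
    cases h2
  · intro hs
    refine hs.append ((PySem.Set.nodup_ofList t).filter _) ?_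
    intro a ha hb
    have := (List.mem_filter.mp hb).2
    simp only [Bool.not_eq_eq_eq_not, Bool.not_true] at this
    rw [(PySem.Set.contains_iff s a).mpr ha] at this
    cases this

theorem aStep_cases (st : Bool × List String) (ab : List String × List String) :
    ∃ ext, (aStep st ab).2 = st.2 ++ ext ∧ (∀ y ∈ ext, y ∈ ab.2 ∧ y ∉ st.2) ∧
      (st.2.Nodup → (st.2 ++ ext).Nodup) ∧
      ((aStep st ab).1 = st.1 ∨ ((aStep st ab).1 = true ∧ ext ≠ [])) ∧
      ((aStep st ab).1 = false → ext = []) ∧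
      (ext = [] → (aStep st ab).1 = st.1) ∧
      (PySem.Set.issubset ab.1 st.2 = true → ∀ y ∈ ab.2, y ∈ (aStep st ab).2) := by
  unfold aStep
  by_cases hc : PySem.Set.issubset ab.1 st.2 = true
  · obtain ⟨ext, he, hmem, hnd⟩ := union_append st.2 ab.2
    simp only [hc, if_true]
    refine ⟨ext, he, hmem, hnd, ?_, ?_, ?_, ?_⟩
    · by_cases hl : st.2.length < (PySem.Set.union st.2 ab.2).length
      · right
        refine ⟨by simp [hl], ?_⟩
        rintro rfl
        rw [he] at hl; simp at hl
      · left; simp [hl]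
    · intro hf
      by_cases hl : st.2.length < (PySem.Set.union st.2 ab.2).length
      · simp [hl] at hf
      · rw [he] at hl
        simp only [List.length_append] at hl
        have : ext.length = 0 := by omega
        exact List.eq_nil_of_length_eq_zero this
    · rintro rfl
      rw [he]
      simp
    · intro _ y hy
      rw [he]
      rw [show st.2 ++ ext = PySem.Set.union st.2 ab.2 from he.symm]
      exact (PySem.Set.mem_union st.2 ab.2 y).mpr (Or.inr hy)
  · refine ⟨[], ?_, ?_, ?_, ?_, ?_, ?_, ?_⟩ <;> simp [hc]

theorem aRound_flag_mono (G : List (List String × List String)) (st : Bool × List String)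
    (h : st.1 = true) : (aRound G st).1 = true := by
  induction G generalizing st with
  | nil => exact h
  | cons ab G ih =>
    show (aRound G (aStep st ab)).1 = true
    apply ih
    obtain ⟨ext, _, _, _, h4, _, _, _⟩ := aStep_cases st ab
    rcases h4 with h4 | h4
    · rw [h4, h]
    · exact h4.1

theorem aRound_spec (G : List (List String × List String)) (st : Bool × List String) :
    ∃ ext, (aRound G st).2 = st.2 ++ ext ∧
      (∀ y ∈ ext, (∃ p ∈ G, y ∈ p.2) ∧ y ∉ st.2) ∧
      (st.2.Nodup → (st.2 ++ ext).Nodup) := by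
  induction G generalizing st with
  | nil => exact ⟨[], by simp [aRound], by simp, by simp⟩
  | cons ab G ih =>
    obtain ⟨e0, he0, hm0, hnd0, _, _, _, _⟩ := aStep_cases st ab
    obtain ⟨e1, he1, hm1, hnd1⟩ := ih (aStep st ab)
    refine ⟨e0 ++ e1, ?_, ?_, ?_⟩
    · show (aRound G (aStep st ab)).2 = _
      rw [he1, he0, List.append_assoc]
    · intro y hy
      rcases List.mem_append.mp hy with hy | hy
      · exact ⟨⟨ab, by simp, (hm0 y hy).1⟩, (hm0 y hy).2⟩
      · obtain ⟨⟨p, hp, hyp⟩, hyn⟩ := hm1 y hy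
        refine ⟨⟨p, by simp [hp], hyp⟩, fun hys => hyn ?_⟩
        rw [he0]
        exact List.mem_append.mpr (Or.inl hys)
    · intro hnd
      have := hnd1 (by rw [he0]; exact hnd0 hnd)
      rw [he0, List.append_assoc] at this
      exact this

theorem aRound_false (G : List (List String × List String)) (st : Bool × List String)
    (h : (aRound G st).1 = false) :
    (aRound G st).2 = st.2 ∧ ∀ p ∈ G, (∀ z ∈ p.1, z ∈ st.2) → ∀ y ∈ p.2, y ∈ st.2 := by
  induction G generalizing st with
  | nil => exact ⟨rfl, by simp⟩
  | cons ab G ih =>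
    have hrw : aRound (ab :: G) st = aRound G (aStep st ab) := rfl
    rw [hrw] at h ⊢
    have hst1 : (aStep st ab).1 = false := by
      cases hf : (aStep st ab).1
      · rfl
      · rw [aRound_flag_mono G _ hf] at h; cases h
    obtain ⟨e0, he0, hm0, _, _, h5, h6, h7⟩ := aStep_cases st ab
    have he : e0 = [] := h5 hst1
    have hstep2 : (aStep st ab).2 = st.2 := by rw [he0, he]; simp
    obtain ⟨ihe, ihc⟩ := ih (aStep st ab) h
    rw [hstep2] at ihe ihc
    refine ⟨ihe, ?_⟩
    intro p hp hsub
    rcases List.mem_cons.mp hp with rfl | hp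
    · intro y hy
      have hcl : PySem.Set.issubset p.1 st.2 = true :=
        (PySem.Set.issubset_iff _ _).mpr hsub
      have := h7 hcl y hy
      rwa [hstep2] at this
    · exact ihc p hp hsub

theorem aRound_true (G : List (List String × List String)) (st : Bool × List String)
    (h0 : st.1 = false) (h : (aRound G st).1 = true) :
    st.2.length < (aRound G st).2.length := by
  induction G generalizing st with
  | nil => rw [show aRound [] st = st from rfl] at h; rw [h] at h0; cases h0
  | cons ab G ih =>
    have hrw : aRound (ab :: G) st = aRound G (aStep st ab) := rfl
    rw [hrw] at h ⊢
    obtain ⟨e0, he0, _, _, h4, _, _, _⟩ := aStep_cases st ab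
    obtain ⟨e1, he1, _, _⟩ := aRound_spec G (aStep st ab)
    cases hf : (aStep st ab).1
    · have := ih (aStep st ab) hf h
      rw [he1, he0] at this ⊢
      simp only [List.length_append] at this ⊢
      omega
    · rcases h4 with h4 | h4
      · rw [hf, h0] at h4; cases h4
      · have hne : e0 ≠ [] := h4.2
        have : 0 < e0.length := List.length_pos_of_ne_nil hne
        rw [he1, he0]
        simp only [List.length_append]
        omega

theorem aRound_sound {F : List (List String × List String)} {K : List String}
    (G : List (List String × List String)) (st : Bool × List String)
    (hG : ∀ p ∈ G, p ∈ F) (h : ∀ y ∈ st.2, Deriv F K y) :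
    ∀ y ∈ (aRound G st).2, Deriv F K y := by
  induction G generalizing st with
  | nil => exact h
  | cons ab G ih =>
    show ∀ y ∈ (aRound G (aStep st ab)).2, Deriv F K y
    apply ih (aStep st ab) (fun p hp => hG p (by simp [hp]))
    intro y hy
    unfold aStep at hy
    by_cases hc : PySem.Set.issubset ab.1 st.2 = true
    · simp only [hc, if_true] at hy
      rcases (PySem.Set.mem_union st.2 ab.2 y).mp hy with hy | hy
      · exact h y hy
      · exact Deriv.step (a := ab.1) (b := ab.2) (by simpa using hG ab (by simp))
          (fun z hz => h z ((PySem.Set.issubset_iff _ _).mp hc z hz)) hy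
    · simp only [if_neg hc] at hy
      exact h y hy

-- ---- A-side loop lemmas ----

theorem aLoop_mono (fuel : Nat) (F : List (List String × List String)) (r : List String) :
    ∀ y ∈ r, y ∈ aLoop fuel F r := by
  induction fuel generalizing r with
  | zero => simp [aLoop]
  | succ fuel ih =>
    intro y hy
    obtain ⟨ext, he, _, _⟩ := aRound_spec F (false, r)
    show y ∈ (if (aRound F (false, r)).1 then aLoop fuel F (aRound F (false, r)).2
      else (aRound F (false, r)).2)
    have hy2 : y ∈ (aRound F (false, r)).2 := by
      rw [he]; exact List.mem_append.mpr (Or.inl hy)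
    split
    · exact ih _ y hy2
    · exact hy2

theorem aLoop_sound {F : List (List String × List String)} {K : List String}
    (fuel : Nat) (r : List String) (h : ∀ y ∈ r, Deriv F K y) :
    ∀ y ∈ aLoop fuel F r, Deriv F K y := by
  induction fuel generalizing r with
  | zero => simpa [aLoop] using h
  | succ fuel ih =>
    intro y hy
    have hs : ∀ z ∈ (aRound F (false, r)).2, Deriv F K z :=
      aRound_sound F (false, r) (fun p hp => hp) h
    have hy2 : y ∈ (if (aRound F (false, r)).1 then aLoop fuel F (aRound F (false, r)).2
      else (aRound F (false, r)).2) := hy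
    split at hy2
    · exact ih _ hs y hy2
    · exact hs y hy2

theorem aLoop_closed (fuel : Nat) (F : List (List String × List String)) (r : List String)
    (hnd : r.Nodup) (hfuel : mAtt F r < fuel) : Closed F (aLoop fuel F r) := by
  induction fuel generalizing r with
  | zero => omega
  | succ fuel ih =>
    show Closed F (if (aRound F (false, r)).1 then aLoop fuel F (aRound F (false, r)).2
      else (aRound F (false, r)).2)
    obtain ⟨ext, he, hm, hnodup⟩ := aRound_spec F (false, r)
    split
    case isFalse hf =>
      obtain ⟨he2, hcl⟩ := aRound_false F (false, r) (Bool.not_eq_true _ ▸ (by simpa using hf))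
      rw [he2]
      exact hcl
    case isTrue hf =>
      have hlt : r.length < (aRound F (false, r)).2.length := aRound_true F (false, r) rfl hf
      have hne : ext ≠ [] := by
        rintro rfl
        rw [he] at hlt; simp at hlt
      obtain ⟨y0, hy0⟩ := List.exists_mem_of_ne_nil ext hne
      have hy0m := hm y0 hy0
      have hy0flat : y0 ∈ F.flatMap Prod.snd := by
        obtain ⟨⟨p, hp, hyp⟩, _⟩ := hy0m
        exact List.mem_flatMap.mpr ⟨p, hp, hyp⟩
      have hmlt : mAtt F (aRound F (false, r)).2 < mAtt F r := by
        apply mAtt_lt (r := r) (fun z hz => by rw [he]; exact List.mem_append.mpr (Or.inl hz))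
          hy0flat hy0m.2
        rw [he]; exact List.mem_append.mpr (Or.inr hy0)
      apply ih
      · rw [he]; exact hnodup hnd
      · omega

theorem aClosure_mem (F : List (List String × List String)) (K : List String) (x : String) :
    x ∈ aClosure F K ↔ Deriv F K x := by
  constructor
  · intro hx
    exact aLoop_sound _ _ (fun y hy => Deriv.base ((PySem.Set.mem_ofList K y).mp hy)) x hx
  · intro hd
    have hc : Closed F (aClosure F K) := by
      apply aLoop_closed _ _ _ (PySem.Set.nodup_ofList K)
      have := mAtt_le_sum F (PySem.Set.ofList K)
      unfold aFuel
      omega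
    have hK : ∀ y ∈ K, y ∈ aClosure F K := fun y hy =>
      aLoop_mono _ _ _ y ((PySem.Set.mem_ofList K y).mpr hy)
    induction hd with
    | base h => exact hK _ h
    | step hF ha hb ih => exact hc _ hF (fun z hz => ih z hz) _ hb

-- ---- B-side lemmas ----

theorem bWatchFold_mem (ab p : List String × List String) :
    ∀ (l : List String) (w : PySem.Dict String (List (List String × List String)))
      (x : String),
      p ∈ (l.foldl (fun w x => w.modify x [] (fun s => s ++ [ab])) w).getD x [] ↔
        p ∈ w.getD x [] ∨ (p = ab ∧ x ∈ l) := by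
  intro l
  induction l with
  | nil => simp
  | cons z l ih =>
    intro w x
    rw [List.foldl_cons, ih]
    rw [PySem.Dict.getD_modify]
    by_cases hxz : x = z
    · subst hxz
      simp only [List.mem_cons]
      by_cases hp : p = ab <;> simp [hp]
    · simp only [if_neg hxz, List.mem_cons]
      tauto

theorem bWatchAdd_mem (ab p : List String × List String)
    (w : PySem.Dict String (List (List String × List String))) (x : String) :
    p ∈ (bWatchAdd ab w).getD x [] ↔ p ∈ w.getD x [] ∨ (p = ab ∧ x ∈ ab.1) := by
  exact bWatchFold_mem ab p ab.1 w x

theorem bWatch_mem (F : List (List String × List String)) (x : String)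
    (p : List String × List String) :
    p ∈ (bWatch F).getD x [] ↔ p ∈ F ∧ x ∈ p.1 := by
  suffices h : ∀ (G : List (List String × List String))
      (w : PySem.Dict String (List (List String × List String))),
      p ∈ (G.foldl (fun w ab => bWatchAdd ab w) w).getD x [] ↔
        p ∈ w.getD x [] ∨ (p ∈ G ∧ x ∈ p.1) by
    have := h F PySem.Dict.empty
    rw [PySem.Dict.getD_empty] at this
    simpa [bWatch] using this
  intro G
  induction G with
  | nil => simp
  | cons ab G ih =>
    intro w
    rw [List.foldl_cons, ih, bWatchAdd_mem]
    constructor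
    · rintro ((h | ⟨rfl, hx⟩) | ⟨hG, hx⟩)
      · exact Or.inl h
      · exact Or.inr ⟨by simp, hx⟩
      · exact Or.inr ⟨by simp [hG], hx⟩
    · rintro (h | ⟨hmem, hx⟩)
      · exact Or.inl (Or.inl h)
      · rcases List.mem_cons.mp hmem with rfl | hG
        · exact Or.inl (Or.inr ⟨rfl, hx⟩)
        · exact Or.inr ⟨hG, hx⟩

theorem bFire_spec (beta clo q : List String) :
    ∃ ext, bFire (clo, q) beta = (clo ++ ext, q ++ ext) ∧
      (∀ y ∈ ext, y ∈ beta ∧ y ∉ clo) ∧ (∀ y ∈ beta, y ∈ clo ++ ext) ∧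
      (clo.Nodup → (clo ++ ext).Nodup) := by
  induction beta generalizing clo q with
  | nil => exact ⟨[], by simp [bFire], by simp, by simp, by simp⟩
  | cons y ys ih =>
    by_cases hy : y ∈ clo
    · have hstep : bFireStep (clo, q) y = (clo, q) := by simp [bFireStep, hy]
      obtain ⟨ext, he, hm, hcov, hnd⟩ := ih clo q
      refine ⟨ext, ?_, ?_, ?_, hnd⟩
      · show ys.foldl bFireStep (bFireStep (clo, q) y) = _
        rw [hstep]; exact he
      · intro z hz
        exact ⟨by simp [(hm z hz).1], (hm z hz).2⟩
      · intro z hz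
        rcases List.mem_cons.mp hz with rfl | hz
        · exact List.mem_append.mpr (Or.inl hy)
        · exact hcov z hz
    · have hadd : PySem.Set.add clo y = clo ++ [y] := PySem.Set.add_of_not_mem hy
      have hstep : bFireStep (clo, q) y = (clo ++ [y], q ++ [y]) := by
        simp [bFireStep, hy]
      obtain ⟨ext, he, hm, hcov, hnd⟩ := ih (clo ++ [y]) (q ++ [y])
      refine ⟨y :: ext, ?_, ?_, ?_, ?_⟩
      · show ys.foldl bFireStep (bFireStep (clo, q) y) = _
        rw [hstep]
        show bFire (clo ++ [y], q ++ [y]) ys = _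
        rw [he]
        simp
      · intro z hz
        rcases List.mem_cons.mp hz with rfl | hz
        · exact ⟨by simp, hy⟩
        · obtain ⟨hz1, hz2⟩ := hm z hz
          exact ⟨by simp [hz1], fun hzc => hz2 (List.mem_append.mpr (Or.inl hzc))⟩
      · intro z hz
        rcases List.mem_cons.mp hz with rfl | hz
        · simp
        · have := hcov z hz
          simpa [List.append_assoc] using this
      · intro hclo
        have h1 : (clo ++ [y]).Nodup := by
          refine hclo.append (List.nodup_singleton y) ?_
          intro a ha hb
          rw [List.mem_singleton] at hb
          subst hb
          exact hy ha
        have := hnd h1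
        simpa [List.append_assoc] using this

theorem bScan_spec (L : List (List String × List String)) (clo q : List String) :
    ∃ ext, bScan L (clo, q) = (clo ++ ext, q ++ ext) ∧
      (∀ y ∈ ext, (∃ p ∈ L, y ∈ p.2) ∧ y ∉ clo) ∧
      (clo.Nodup → (clo ++ ext).Nodup) ∧
      (∀ p ∈ L, (∀ z ∈ p.1, z ∈ clo ++ ext) →
        (∀ y ∈ p.2, y ∈ clo ++ ext) ∨ ∃ z ∈ p.1, z ∈ ext) := by
  induction L generalizing clo q with
  | nil => exact ⟨[], by simp [bScan], by simp, by simp, by simp⟩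
  | cons p0 L ih =>
    by_cases hc : PySem.Set.issubset p0.1 clo = true
    · have hstep : bScanStep (clo, q) p0 = bFire (clo, q) p0.2 := by simp [bScanStep, hc]
      obtain ⟨e0, hf, hm0, hcov0, hnd0⟩ := bFire_spec p0.2 clo q
      obtain ⟨e1, hs1, hm1, hnd1, hc41⟩ := ih (clo ++ e0) (q ++ e0)
      refine ⟨e0 ++ e1, ?_, ?_, ?_, ?_⟩
      · show L.foldl bScanStep (bScanStep (clo, q) p0) = _
        rw [hstep, hf]
        show bScan L (clo ++ e0, q ++ e0) = _
        rw [hs1]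
        simp [List.append_assoc]
      · intro y hy
        rcases List.mem_append.mp hy with hy | hy
        · exact ⟨⟨p0, by simp, (hm0 y hy).1⟩, (hm0 y hy).2⟩
        · obtain ⟨⟨pp, hpp, hyp⟩, hyn⟩ := hm1 y hy
          exact ⟨⟨pp, by simp [hpp], hyp⟩, fun hyc => hyn (List.mem_append.mpr (Or.inl hyc))⟩
      · intro hclo
        have := hnd1 (hnd0 hclo)
        simpa [List.append_assoc] using this
      · intro pp hpp hcovp
        rcases List.mem_cons.mp hpp with rfl | hpp
        · left
          intro y hy
          have := hcov0 y hy
          rcases List.mem_append.mp this with h | h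
          · exact List.mem_append.mpr (Or.inl h)
          · exact List.mem_append.mpr (Or.inr (List.mem_append.mpr (Or.inl h)))
        · have hcovp' : ∀ z ∈ pp.1, z ∈ (clo ++ e0) ++ e1 := by
            intro z hz
            have := hcovp z hz
            simpa [List.append_assoc] using this
          rcases hc41 pp hpp hcovp' with h | ⟨z, hz, hze⟩
          · left
            intro y hy
            have := h y hy
            simpa [List.append_assoc] using this
          · exact Or.inr ⟨z, hz, List.mem_append.mpr (Or.inr hze)⟩
    · have hstep : bScanStep (clo, q) p0 = (clo, q) := by simp [bScanStep, hc]
      obtain ⟨e1, hs1, hm1, hnd1, hc41⟩ := ih clo q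
      refine ⟨e1, ?_, ?_, hnd1, ?_⟩
      · show L.foldl bScanStep (bScanStep (clo, q) p0) = _
        rw [hstep]
        exact hs1
      · intro z hz
        exact ⟨(hm1 z hz).1.imp (fun pp h => ⟨by simp [h.1], h.2⟩), (hm1 z hz).2⟩
      · intro pp hpp hcovp
        rcases List.mem_cons.mp hpp with rfl | hpp
        · right
          have hex : ∃ z ∈ pp.1, z ∉ clo := by
            by_contra hall
            push Not at hall
            exact hc ((PySem.Set.issubset_iff _ _).mpr hall)
          obtain ⟨z, hz, hzc⟩ := hex
          refine ⟨z, hz, ?_⟩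
          rcases List.mem_append.mp (hcovp z hz) with h | h
          · exact absurd h hzc
          · exact h
        · exact hc41 pp hpp hcovp

theorem bScan_sound {F : List (List String × List String)} {K : List String}
    (L : List (List String × List String)) (clo q : List String)
    (hL : ∀ p ∈ L, p ∈ F) (h : ∀ y ∈ clo, Deriv F K y) :
    ∀ y ∈ (bScan L (clo, q)).1, Deriv F K y := by
  induction L generalizing clo q with
  | nil => exact h
  | cons p0 L ih =>
    show ∀ y ∈ (L.foldl bScanStep (bScanStep (clo, q) p0)).1, Deriv F K y
    by_cases hc : PySem.Set.issubset p0.1 clo = true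
    · have hstep : bScanStep (clo, q) p0 = bFire (clo, q) p0.2 := by simp [bScanStep, hc]
      rw [hstep]
      obtain ⟨e0, hf, hm0, _, _⟩ := bFire_spec p0.2 clo q
      rw [hf]
      apply ih _ _ (fun pp hpp => hL pp (by simp [hpp]))
      intro y hy
      rcases List.mem_append.mp hy with hy | hy
      · exact h y hy
      · exact Deriv.step (a := p0.1) (b := p0.2) (by simpa using hL p0 (by simp))
          (fun z hz => h z ((PySem.Set.issubset_iff _ _).mp hc z hz)) (hm0 y hy).1
    · have hstep : bScanStep (clo, q) p0 = (clo, q) := by simp [bScanStep, hc]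
      rw [hstep]
      exact ih _ _ (fun pp hpp => hL pp (by simp [hpp])) h

def ClosInv (F : List (List String × List String)) (K clo q : List String) : Prop :=
  (∀ y ∈ clo, Deriv F K y) ∧ clo.Nodup ∧
    ∀ p ∈ F, (∀ z ∈ p.1, z ∈ clo) → (∀ y ∈ p.2, y ∈ clo) ∨ ∃ z ∈ p.1, z ∈ q

theorem bLoop_spec (F : List (List String × List String)) (K : List String) :
    ∀ (fuel : Nat) (clo q : List String), ClosInv F K clo q →
      mAtt F clo + q.length < fuel →
      (∀ y ∈ clo, y ∈ bLoop fuel (bWatch F) (clo, q)) ∧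
      (∀ y ∈ bLoop fuel (bWatch F) (clo, q), Deriv F K y) ∧
      Closed F (bLoop fuel (bWatch F) (clo, q)) := by
  intro fuel
  induction fuel with
  | zero => intro clo q _ hf; omega
  | succ fuel ih =>
    intro clo q hInv hfuel
    obtain ⟨hSound, hNodup, hJ⟩ := hInv
    have hrw : bLoop (fuel + 1) (bWatch F) (clo, q) =
        (match q.getLast? with
          | none => clo
          | some x => bLoop fuel (bWatch F)
              (bScan ((bWatch F).getD x []) (clo, q.dropLast))) := rfl
    cases hq : q.getLast? with
    | none =>
      have hqnil : q = [] := List.getLast?_eq_none_iff.mp hq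
      rw [hrw, hq]
      refine ⟨fun y hy => hy, hSound, ?_⟩
      intro p hp hcov
      rcases hJ p hp hcov with h | ⟨z, hz, hzq⟩
      · exact h
      · rw [hqnil] at hzq; cases hzq
    | some x =>
      obtain ⟨q1, rfl⟩ := List.getLast?_eq_some_iff.mp hq
      have hdrop : (q1 ++ [x]).dropLast = q1 := List.dropLast_concat ..
      obtain ⟨ext, hse, hm, hnd, hc4⟩ := bScan_spec ((bWatch F).getD x []) clo q1
      have hLF : ∀ p ∈ (bWatch F).getD x [], p ∈ F := fun p hp => ((bWatch_mem F x p).mp hp).1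
      have hSound2 : ∀ y ∈ clo ++ ext, Deriv F K y := by
        have h0 := bScan_sound (F := F) (K := K) ((bWatch F).getD x []) clo q1 hLF hSound
        rw [hse] at h0
        exact h0
      have hNodup2 := hnd hNodup
      have hextflat : ∀ y ∈ ext, y ∈ F.flatMap Prod.snd ∧ y ∉ clo := by
        intro y hy
        obtain ⟨⟨p, hp, hyp⟩, hyc⟩ := hm y hy
        exact ⟨List.mem_flatMap.mpr ⟨p, hLF p hp, hyp⟩, hyc⟩
      have hextnd : ext.Nodup := hNodup2.of_append_right
      have hdropm := mAtt_drop hextnd hextflat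
      have hJ2 : ∀ p ∈ F, (∀ z ∈ p.1, z ∈ clo ++ ext) →
          (∀ y ∈ p.2, y ∈ clo ++ ext) ∨ ∃ z ∈ p.1, z ∈ q1 ++ ext := by
        intro p hp hcov
        by_cases hx : x ∈ p.1
        · have hpL : p ∈ (bWatch F).getD x [] := (bWatch_mem F x p).mpr ⟨hp, hx⟩
          rcases hc4 p hpL hcov with h | ⟨z, hz, hze⟩
          · exact Or.inl h
          · exact Or.inr ⟨z, hz, List.mem_append.mpr (Or.inr hze)⟩
        · by_cases hex : ∃ z ∈ p.1, z ∈ ext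
          · obtain ⟨z, hz, hze⟩ := hex
            exact Or.inr ⟨z, hz, List.mem_append.mpr (Or.inr hze)⟩
          · push Not at hex
            have hcov2 : ∀ z ∈ p.1, z ∈ clo := by
              intro z hz
              rcases List.mem_append.mp (hcov z hz) with h | h
              · exact h
              · exact absurd h (hex z hz)
            rcases hJ p hp hcov2 with h | ⟨z, hz, hzq⟩
            · exact Or.inl (fun y hy => List.mem_append.mpr (Or.inl (h y hy)))
            · rcases List.mem_append.mp hzq with h1 | h1
              · exact Or.inr ⟨z, hz, List.mem_append.mpr (Or.inl h1)⟩
              · rw [List.mem_singleton] at h1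
                subst h1
                exact absurd hz hx
      have hfuel2 : mAtt F (clo ++ ext) + (q1 ++ ext).length < fuel := by
        simp only [List.length_append, List.length_cons] at hfuel ⊢
        omega
      have hres := ih (clo ++ ext) (q1 ++ ext) ⟨hSound2, hNodup2, hJ2⟩ hfuel2
      have hgoal : bLoop (fuel + 1) (bWatch F) (clo, q1 ++ [x]) =
          bLoop fuel (bWatch F) (clo ++ ext, q1 ++ ext) := by
        rw [hrw, hq]
        show bLoop fuel (bWatch F)
          (bScan ((bWatch F).getD x []) (clo, (q1 ++ [x]).dropLast)) = _
        rw [hdrop, hse]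
      rw [hgoal]
      exact ⟨fun y hy => hres.1 y (List.mem_append.mpr (Or.inl hy)), hres.2.1, hres.2.2⟩

theorem bClosure_mem (F : List (List String × List String)) (K : List String) (x : String) :
    x ∈ bClosure F K ↔ Deriv F K x := by
  obtain ⟨ext, hse, hm, hnd, hc4⟩ := bScan_spec F (PySem.Set.ofList K) K
  have hSound : ∀ y ∈ PySem.Set.ofList K ++ ext, Deriv F K y := by
    have h0 := bScan_sound (F := F) (K := K) F (PySem.Set.ofList K) K (fun p hp => hp)
      (fun y hy => Deriv.base ((PySem.Set.mem_ofList K y).mp hy))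
    rw [hse] at h0
    exact h0
  have hNodup := hnd (PySem.Set.nodup_ofList K)
  have hJ : ∀ p ∈ F, (∀ z ∈ p.1, z ∈ PySem.Set.ofList K ++ ext) →
      (∀ y ∈ p.2, y ∈ PySem.Set.ofList K ++ ext) ∨ ∃ z ∈ p.1, z ∈ K ++ ext := by
    intro p hp hcov
    rcases hc4 p hp hcov with h | ⟨z, hz, hze⟩
    · exact Or.inl h
    · exact Or.inr ⟨z, hz, List.mem_append.mpr (Or.inr hze)⟩
  have hextflat : ∀ y ∈ ext, y ∈ F.flatMap Prod.snd ∧ y ∉ PySem.Set.ofList K := by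
    intro y hy
    obtain ⟨⟨p, hp, hyp⟩, hyc⟩ := hm y hy
    exact ⟨List.mem_flatMap.mpr ⟨p, hp, hyp⟩, hyc⟩
  have hextnd : ext.Nodup := hNodup.of_append_right
  have hdropm := mAtt_drop hextnd hextflat
  have hfuel : mAtt F (PySem.Set.ofList K ++ ext) + (K ++ ext).length < bFuel F K := by
    have h1 := mAtt_le_sum F (PySem.Set.ofList K)
    unfold bFuel
    simp only [List.length_append] at *
    omega
  have hres := bLoop_spec F K (bFuel F K) (PySem.Set.ofList K ++ ext) (K ++ ext)
    ⟨hSound, hNodup, hJ⟩ hfuel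
  have hcl : bClosure F K = bLoop (bFuel F K) (bWatch F) (PySem.Set.ofList K ++ ext, K ++ ext) := by
    unfold bClosure
    rw [hse]
  constructor
  · intro hx
    rw [hcl] at hx
    exact hres.2.1 x hx
  · intro hd
    rw [hcl]
    have hK : ∀ y ∈ K, y ∈ bLoop (bFuel F K) (bWatch F) (PySem.Set.ofList K ++ ext, K ++ ext) :=
      fun y hy => hres.1 y (List.mem_append.mpr (Or.inl ((PySem.Set.mem_ofList K y).mpr hy)))
    induction hd with
    | base h => exact hK _ h
    | step hF ha hb ih => exact hres.2.2 _ hF (fun z hz => ih z hz) _ hb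

-- ---- assembly ----

theorem Deriv_mono_K {F : List (List String × List String)} {K K' : List String}
    (h : ∀ y, y ∈ K → y ∈ K') {x : String} (hd : Deriv F K x) : Deriv F K' x := by
  induction hd with
  | base hx => exact Deriv.base (h _ hx)
  | step hF ha hb ih => exact Deriv.step hF ih hb

theorem closure_equal (F : List (List String × List String)) (R a : List String) :
    PySem.Set.equal (aClosure F (PySem.Set.ofList a)) R = PySem.Set.equal (bClosure F a) R := by
  have hm : ∀ z, z ∈ aClosure F (PySem.Set.ofList a) ↔ z ∈ bClosure F a := by
    intro z
    rw [aClosure_mem, bClosure_mem]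
    constructor
    · exact Deriv_mono_K (fun y hy => (PySem.Set.mem_ofList a y).mp hy)
    · exact Deriv_mono_K (fun y hy => (PySem.Set.mem_ofList a y).mpr hy)
  apply Bool.eq_iff_iff.mpr
  rw [PySem.Set.equal_iff, PySem.Set.equal_iff]
  exact forall_congr' (fun z => iff_congr (hm z) Iff.rfl)

theorem issubset_ofList_left (s t : List String) :
    PySem.Set.issubset (PySem.Set.ofList s) t = PySem.Set.issubset s t := by
  apply Bool.eq_iff_iff.mpr
  rw [PySem.Set.issubset_iff, PySem.Set.issubset_iff]
  exact ⟨fun h y hy => h y ((PySem.Set.mem_ofList s y).mpr hy),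
    fun h y hy => h y ((PySem.Set.mem_ofList s y).mp hy)⟩

theorem issubset_ofList_right (s t : List String) :
    PySem.Set.issubset s (PySem.Set.ofList t) = PySem.Set.issubset s t := by
  apply Bool.eq_iff_iff.mpr
  rw [PySem.Set.issubset_iff, PySem.Set.issubset_iff]
  exact ⟨fun h y hy => (PySem.Set.mem_ofList t y).mp (h y hy),
    fun h y hy => (PySem.Set.mem_ofList t y).mpr (h y hy)⟩

theorem main_eq (F0 : List (List String × List String)) :
    ∀ (l : List (List String × List String)) (R : List String),
      aMain F0 l R = bMain F0 l R := by
  intro l R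
  induction l with
  | nil => rfl
  | cons ab rest ih =>
    show aMain F0 (ab :: rest) R = bMain F0 (ab :: rest) R
    simp only [aMain, bMain, aIsSuperKey, issubset_ofList_left, issubset_ofList_right,
      closure_equal]
    cases h1 : PySem.Set.issubset ab.1 R <;> cases h2 : PySem.Set.issubset ab.2 R <;>
      cases h3 : PySem.Set.issubset ab.2 ab.1 <;>
      cases h4 : PySem.Set.equal (bClosure F0 ab.1) R <;>
      simp [ih]

-- ===== VERDICT (by name: the statement is the Claim_ definition above) =====
theorem isBCNF_spec : Claim_equal_isBCNF := by
  intro F R _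
  unfold Spec_isBCNF isBCNF isBCNF_alt
  exact main_eq F F R
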